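-- pv_equiv track=rewrite | github.com/S-Stern/sigma_labs | pre-learning/game-of-life/game.py | generate_new_board
-- ===== SOURCE A (Python) =====
-- def generate_new_board(seed: list, height: int, width: int) -> list:
--     new_board = []
--     for x in range(height):
--         new_row = []
--         if seed[x:x+1]:
--             new_row += seed[x][:width]
--         diff = width - len(new_row)
--         if diff > 0:
--             new_row += [0 for _ in range(diff)]
--         new_board.append(new_row)
--     return new_board
-- ===== SOURCE B (Python) =====
-- def generate_new_board(seed: list, height: int, width: int) -> list:
--     rows = len(seed)
--     return [
--         [seed[x][y] if x < rows and y < len(seed[x]) else 0 for y in range(width)]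
--         for x in range(height)
--     ]
-- ===== Notes on version B (the rewrite author's own statement) =====
-- stated objective: simpler
-- what changed: Replaces the slice-then-pad row construction (slice guard, prefix copy, computed padding remainder) with a single nested comprehension that emits each cell directly as seed[x][y] when in bounds and 0 otherwise.
-- intended difference: When width is negative and some row seed[x] with x < height is longer than -width, A's seed[x][:width] keeps a nonempty prefix so A returns boards with leftover cells, while B returns empty rows; a negative width means a zero-wide board, so B's empty rows are the intended value. — e.g. on generate_new_board([[1, 2]], 1, -1): A returns [[1]], B returns [[]]
import Mathlib
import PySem

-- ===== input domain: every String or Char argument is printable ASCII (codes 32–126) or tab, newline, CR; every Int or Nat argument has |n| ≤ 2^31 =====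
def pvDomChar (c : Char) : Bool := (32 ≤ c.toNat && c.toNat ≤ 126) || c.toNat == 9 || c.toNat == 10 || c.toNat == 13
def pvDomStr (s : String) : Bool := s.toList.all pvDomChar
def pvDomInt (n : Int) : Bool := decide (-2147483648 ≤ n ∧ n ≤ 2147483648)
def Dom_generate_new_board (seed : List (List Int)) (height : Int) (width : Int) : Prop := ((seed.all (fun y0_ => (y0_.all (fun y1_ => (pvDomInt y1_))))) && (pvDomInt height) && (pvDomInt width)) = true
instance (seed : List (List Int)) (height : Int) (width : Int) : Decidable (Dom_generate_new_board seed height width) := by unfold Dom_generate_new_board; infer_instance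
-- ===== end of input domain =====

-- B builds the board cell by cell (nested comprehension) instead of A's slice-then-pad rows; simpler, same cost; A=B except for negative width (see D_).

-- ===== PORT A =====
def generate_new_board (seed : List (List Int)) (height : Int) (width : Int) : List (List Int) :=
  (PySem.List.pyRange 0 height 1).foldl (fun new_board x =>
    let new_row : List Int := []
    let new_row : List Int :=
      if PySem.List.slice seed (some x) (some (x + 1)) ≠ [] then
        new_row ++ PySem.List.slice ((PySem.List.pyGet? seed x).getD []) none (some width)
      else new_row
    let diff : Int := width - (new_row.length : Int)
    let new_row : List Int :=
      if diff > 0 then new_row ++ (PySem.List.pyRange 0 diff 1).map (fun _ => (0 : Int))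
      else new_row
    new_board ++ [new_row]) []

-- ===== PORT B =====
def generate_new_board_alt (seed : List (List Int)) (height : Int) (width : Int) : List (List Int) :=
  (PySem.List.pyRange 0 height 1).map (fun x =>
    (PySem.List.pyRange 0 width 1).map (fun y =>
      if x < (seed.length : Int) ∧ y < ((((PySem.List.pyGet? seed x).getD []).length : Int))
      then (PySem.List.pyGet? ((PySem.List.pyGet? seed x).getD []) y).getD 0
      else 0))

-- ===== PRECONDITION & SPEC =====
-- When width is negative and some row seed[x] with x < height is longer than -width, A keeps the
-- nonempty prefix seed[x][:width] while B returns an empty row; a negative width means a zero-wide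
-- board, so B's empty rows are the intended value.
def D_generate_new_board (seed : List (List Int)) (height : Int) (width : Int) : Prop :=
  width < 0 ∧ (seed.take height.toNat).any (fun r => decide (-width < (r.length : Int))) = true
instance (seed : List (List Int)) (height : Int) (width : Int) : Decidable (D_generate_new_board seed height width) := by unfold D_generate_new_board; infer_instance

def Spec_generate_new_board (seed : List (List Int)) (height : Int) (width : Int) (out : List (List Int)) : Prop := ¬ D_generate_new_board seed height width → out = generate_new_board_alt seed height width
instance (seed : List (List Int)) (height : Int) (width : Int) (out : List (List Int)) : Decidable (Spec_generate_new_board seed height width out) := by unfold Spec_generate_new_board; infer_instance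

def pvDiffWitness_generate_new_board : List (List Int) × Int × Int := ([[1, 2]], 1, -1)
def pvDiffWitnessOut_generate_new_board : (List (List Int)) × (List (List Int)) := ([[1]], [[]])

-- ===== CLAIM (what is proved, stated in full; the proofs are below) =====
def Claim_unchanged_generate_new_board : Prop := ∀ (seed : List (List Int)) (height : Int) (width : Int), Dom_generate_new_board seed height width → Spec_generate_new_board seed height width (generate_new_board seed height width)
def Claim_changed_generate_new_board : Prop := Dom_generate_new_board (pvDiffWitness_generate_new_board.1) (pvDiffWitness_generate_new_board.2.1) (pvDiffWitness_generate_new_board.2.2) ∧ D_generate_new_board (pvDiffWitness_generate_new_board.1) (pvDiffWitness_generate_new_board.2.1) (pvDiffWitness_generate_new_board.2.2) ∧ generate_new_board (pvDiffWitness_generate_new_board.1) (pvDiffWitness_generate_new_board.2.1) (pvDiffWitness_generate_new_board.2.2) = pvDiffWitnessOut_generate_new_board.1 ∧ generate_new_board_alt (pvDiffWitness_generate_new_board.1) (pvDiffWitness_generate_new_board.2.1) (pvDiffWitness_generate_new_board.2.2) = pvDiffWitnessOut_generate_new_board.2 ∧ pvDiffWitnessOut_generate_new_board.1 ≠ pv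DiffWitnessOut_generate_new_board.2
def Claim_exact_generate_new_board : Prop := ∀ (seed : List (List Int)) (height : Int) (width : Int), Dom_generate_new_board seed height width → D_generate_new_board seed height width → generate_new_board seed height width ≠ generate_new_board_alt seed height width

-- ===== LEMMAS AND PROOFS =====

-- the row A builds for loop index x
def rowA (seed : List (List Int)) (width : Int) (x : Int) : List Int :=
  let new_row : List Int :=
    if PySem.List.slice seed (some x) (some (x + 1)) ≠ [] then
      PySem.List.slice ((PySem.List.pyGet? seed x).getD []) none (some width)
    else []
  if width - (new_row.length : Int) > 0 then
    new_row ++ (PySem.List.pyRange 0 (width - (new_row.length : Int)) 1).map (fun _ => (0 : Int))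
  else new_row

-- the row B builds for loop index x
def rowB (seed : List (List Int)) (width : Int) (x : Int) : List Int :=
  (PySem.List.pyRange 0 width 1).map (fun y =>
    if x < (seed.length : Int) ∧ y < ((((PySem.List.pyGet? seed x).getD []).length : Int))
    then (PySem.List.pyGet? ((PySem.List.pyGet? seed x).getD []) y).getD 0
    else 0)

theorem generate_new_board_eq_map (seed : List (List Int)) (height width : Int) :
    generate_new_board seed height width = (PySem.List.pyRange 0 height 1).map (rowA seed width) := by
  simp only [generate_new_board, PySem.List.foldl_append_singleton_eq_map, List.nil_append]
  rfl

theorem alt_eq_map (seed : List (List Int)) (height width : Int) :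
    generate_new_board_alt seed height width = (PySem.List.pyRange 0 height 1).map (rowB seed width) := rfl

theorem zeros_eq_replicate (m : Int) :
    (PySem.List.pyRange 0 m 1).map (fun _ => (0 : Int)) = List.replicate m.toNat 0 := by
  rw [PySem.List.pyRange_one, List.map_map]
  simp [List.eq_replicate_iff]

-- core row identity for nonnegative width when x indexes a real row of seed
theorem row_core (r : List Int) (n : Nat) :
    r.take n ++ List.replicate (n - r.length) 0
      = (List.range n).map (fun y => if y < r.length then r.getD y 0 else 0) := by
  apply List.ext_getElem
  · simp; omega
  · intro i h1 h2
    simp only [List.getElem_map, List.getElem_range]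
    rw [List.getElem_append]
    split
    · next h =>
      simp only [List.length_take] at h
      rw [List.getElem_take]
      have hi : i < r.length := by omega
      simp [hi, List.getD_eq_getElem?_getD]
    · next h =>
      simp only [List.length_take] at h
      have hn : i < n := by simpa using h2
      have : ¬ i < r.length := by omega
      simp [this]

theorem rowB_of_lt (seed : List (List Int)) (width x : Int) (hx : 0 ≤ x) (hlt : x.toNat < seed.length)
    (hw : 0 ≤ width) :
    rowB seed width x = (List.range width.toNat).map
      (fun y => if y < (seed[x.toNat]).length then (seed[x.toNat]).getD y 0 else 0) := by
  have hget : PySem.List.pyGet? seed x = some seed[x.toNat] :=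
    PySem.List.pyGet?_eq_some_getElem seed hx (by omega)
  unfold rowB
  rw [PySem.List.pyRange_one, List.map_map]
  have hsz : (width - 0).toNat = width.toNat := by omega
  rw [hsz]
  apply List.map_congr_left
  intro k hk
  simp only [List.mem_range] at hk
  have hxlt : x < (seed.length : Int) := by omega
  have hsub : ((0:Int) + (k:Int)) = (k : Int) := by ring
  simp only [hget, Option.getD_some, Function.comp, hsub]
  by_cases hy : k < (seed[x.toNat]).length
  · have : ((k:Int)) < ((seed[x.toNat]).length : Int) := by exact_mod_cast hy
    simp [hxlt, this, hy, List.getD_eq_getElem?_getD]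
  · have : ¬ ((k:Int)) < ((seed[x.toNat]).length : Int) := by exact_mod_cast hy
    simp [hxlt, this, hy]

theorem row_eq (seed : List (List Int)) (height width x : Int)
    (hx : 0 ≤ x) (hxh : x < height)
    (hnd : ¬ D_generate_new_board seed height width) :
    rowA seed width x = rowB seed width x := by
  by_cases hmem : x.toNat < seed.length
  · -- real row
    have hget : PySem.List.pyGet? seed x = some seed[x.toNat] :=
      PySem.List.pyGet?_eq_some_getElem seed hx (by omega)
    have hslice : PySem.List.slice seed (some x) (some (x + 1)) ≠ [] := by
      rw [PySem.List.slice_toNat seed hx (by omega)]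
      have h1 : (x + 1).toNat - x.toNat = 1 := by omega
      rw [h1]
      have : seed.drop x.toNat ≠ [] := by
        simp [List.drop_eq_nil_iff]; omega
      intro hc
      rcases List.exists_cons_of_ne_nil this with ⟨a, t, ht⟩
      simp [ht] at hc
    set r := seed[x.toNat] with hr
    by_cases hw : 0 ≤ width
    · -- nonnegative width: prefix + padding = cellwise row
      have hpre : PySem.List.slice r none (some width) = r.take width.toNat :=
        PySem.List.slice_to r hw
      unfold rowA
      rw [if_pos hslice, hget]
      simp only [Option.getD_some, hpre]
      rw [rowB_of_lt seed width x hx hmem hw, ← hr, ← row_core]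
      have hlen : (r.take width.toNat).length = min width.toNat r.length := by simp
      by_cases hd : width - ((r.take width.toNat).length : Int) > 0
      · rw [if_pos hd, zeros_eq_replicate]
        congr 1
        congr 1
        rw [hlen] at hd ⊢
        omega
      · rw [if_neg hd]
        rw [hlen] at hd
        have : width.toNat - r.length = 0 := by omega
        simp [this]
    · -- negative width: ¬D forces the prefix empty; both rows are []
      rw [not_le] at hw
      have hk : width = -(((-width).toNat : Int)) := by omega
      have hrmem : r ∈ seed.take height.toNat := by
        rw [hr]
        have : seed[x.toNat] = (seed.take height.toNat)[x.toNat]'(by simp; omega) := by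
          rw [List.getElem_take]
        rw [this]
        exact List.getElem_mem _
      have hrlen : ¬ (-width < (r.length : Int)) := by
        intro hc
        exact hnd ⟨hw, by rw [List.any_eq_true]; exact ⟨r, hrmem, by simpa using hc⟩⟩
      have hpre : PySem.List.slice r none (some width) = [] := by
        rw [hk, PySem.List.slice_to_neg_natCast r ((-width).toNat) (by omega)]
        have : r.length - (-width).toNat = 0 := by omega
        simp [this]
      unfold rowA rowB
      rw [if_pos hslice, hget]
      simp only [Option.getD_some, hpre, List.length_nil, Nat.cast_zero, sub_zero]
      rw [if_neg (by omega : ¬ width > 0), PySem.List.pyRange_one_eq_nil (by omega)]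
      rfl
  · -- x beyond seed: A pads a fresh row with zeros, B's bound test fails everywhere
    have hslice : PySem.List.slice seed (some x) (some (x + 1)) = [] := by
      rw [PySem.List.slice_toNat seed hx (by omega)]
      simp [List.drop_eq_nil_iff]; omega
    have hxge : ¬ (x < (seed.length : Int)) := by omega
    unfold rowA rowB
    rw [if_neg (by simp [hslice] : ¬ PySem.List.slice seed (some x) (some (x + 1)) ≠ [])]
    simp only [List.length_nil, Nat.cast_zero, sub_zero, List.nil_append]
    by_cases hw : width > 0
    · rw [if_pos hw]
      apply List.map_congr_left
      intro y _
      simp [hxge]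
    · rw [if_neg hw, PySem.List.pyRange_one_eq_nil (not_lt.mp hw)]
      rfl

-- inside D_, A's row at the offending index is nonempty while B's is empty
theorem rowB_neg (seed : List (List Int)) (width x : Int) (hw : width < 0) :
    rowB seed width x = [] := by
  unfold rowB
  rw [PySem.List.pyRange_one_eq_nil (by omega)]
  rfl

theorem rowA_neg_ne (seed : List (List Int)) (width x : Int) (hx : 0 ≤ x)
    (hmem : x.toNat < seed.length) (hw : width < 0)
    (hlong : -width < ((seed[x.toNat]).length : Int)) :
    rowA seed width x ≠ [] := by
  have hget : PySem.List.pyGet? seed x = some seed[x.toNat] :=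
    PySem.List.pyGet?_eq_some_getElem seed hx (by omega)
  have hslice : PySem.List.slice seed (some x) (some (x + 1)) ≠ [] := by
    rw [PySem.List.slice_toNat seed hx (by omega)]
    have h1 : (x + 1).toNat - x.toNat = 1 := by omega
    rw [h1]
    have : seed.drop x.toNat ≠ [] := by simp [List.drop_eq_nil_iff]; omega
    intro hc
    rcases List.exists_cons_of_ne_nil this with ⟨a, t, ht⟩
    simp [ht] at hc
  set r := seed[x.toNat] with hr
  have hk : width = -(((-width).toNat : Int)) := by omega
  have hpre : PySem.List.slice r none (some width) = r.take (r.length - (-width).toNat) := by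
    have h := PySem.List.slice_to_neg_natCast r ((-width).toNat) (by omega)
    rwa [← hk] at h
  have hpos : 0 < r.length - (-width).toNat := by omega
  have hne : PySem.List.slice r none (some width) ≠ [] := by
    rw [hpre]
    simp only [ne_eq, List.take_eq_nil_iff]
    push Not
    constructor <;> [omega; (intro hc; simp [hc] at hpos)]
  unfold rowA
  rw [if_pos hslice, hget]
  simp only [Option.getD_some]
  split
  · intro hc
    rcases List.exists_cons_of_ne_nil hne with ⟨a, t, ht⟩
    simp [ht] at hc
  · exact hne

-- ===== VERDICT (by name: the statement is the Claim_ definition above) =====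
theorem generate_new_board_spec : Claim_unchanged_generate_new_board := by
  intro seed height width _ hnd
  rw [generate_new_board_eq_map, alt_eq_map]
  apply List.map_congr_left
  intro x hx
  rw [PySem.List.mem_pyRange_one] at hx
  exact row_eq seed height width x hx.1 hx.2 hnd

theorem generate_new_board_changed : Claim_changed_generate_new_board := by
  unfold Claim_changed_generate_new_board; decide

theorem generate_new_board_tight : Claim_exact_generate_new_board := by
  intro seed height width _ hd
  rcases hd with ⟨hw, hany⟩
  rw [List.any_eq_true] at hany
  rcases hany with ⟨r, hrmem, hrlen⟩
  rw [List.mem_iff_getElem] at hrmem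
  rcases hrmem with ⟨i, hi, hri⟩
  have hi' : i < seed.length := by
    have := hi; simp [List.length_take] at this; omega
  have hih : (i : Int) < height := by
    have := hi; simp [List.length_take] at this; omega
  simp only [List.getElem_take] at hri
  intro hc
  rw [generate_new_board_eq_map, alt_eq_map, List.map_inj_left] at hc
  have hmem : ((i : Int)) ∈ PySem.List.pyRange 0 height 1 := by
    rw [PySem.List.mem_pyRange_one]
    exact ⟨by omega, hih⟩
  have heq := hc _ hmem
  rw [rowB_neg seed width _ hw] at heq
  have hti : ((i : Int)).toNat = i := Int.toNat_natCast i
  refine rowA_neg_ne seed width (i : Int) (by omega) (by simpa using hi') hw ?_ heq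
  simp only [hti, hri]
  simpa using hrlen
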